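-- pv_equiv track=rewrite | github.com/wangdiues/Vegetation_Ecology | 04_reference_Validator/reference_validator.py | split_references
-- ===== SOURCE A (Python) =====
-- def split_references(paras: list[str]) -> tuple[list[str], list[str]]:
--     ref_idx = None
--     for i, p in enumerate(paras):
--         if p.strip().lower() == "references":
--             ref_idx = i
--             break
--     if ref_idx is None:
--         return paras, []
--     return paras[:ref_idx], paras[ref_idx + 1 :]
-- ===== SOURCE B (Python) =====
-- def split_references(paras: list[str]) -> tuple[list[str], list[str]]:
--     found = False
--     before: list[str] = []
--     after: list[str] = []
--     for p in paras:
--         if not found and p.strip().lower() == "references":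
--             found = True
--             continue
--         if found:
--             after.append(p)
--         else:
--             before.append(p)
--     return before, after
-- ===== Notes on version B (the rewrite author's own statement) =====
-- stated objective: simpler
-- what changed: Replaces the index-search-then-two-slices scheme with a single incremental pass that partitions paragraphs into 'before' and 'after' lists around a found-flag, so no index arithmetic or slicing is needed.
import Mathlib
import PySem

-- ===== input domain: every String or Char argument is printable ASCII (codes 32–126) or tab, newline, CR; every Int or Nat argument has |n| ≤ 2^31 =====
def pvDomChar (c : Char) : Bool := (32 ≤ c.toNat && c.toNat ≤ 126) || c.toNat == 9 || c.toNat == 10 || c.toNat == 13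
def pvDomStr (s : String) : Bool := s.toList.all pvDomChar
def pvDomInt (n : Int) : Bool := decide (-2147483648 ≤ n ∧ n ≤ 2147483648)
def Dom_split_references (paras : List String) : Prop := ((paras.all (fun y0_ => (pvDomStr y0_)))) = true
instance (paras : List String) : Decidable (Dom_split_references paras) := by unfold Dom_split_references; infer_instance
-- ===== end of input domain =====

-- B replaces A's index-search-plus-two-slices with a single incremental pass that
-- partitions paragraphs around a found-flag (simpler decomposition; same O(n) cost).

-- shared marker test: p.strip().lower() == "references"
def pvIsRef (p : String) : Bool := PySem.Str.lower (PySem.Str.strip p) == "references"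

-- ===== PORT A =====
-- the 'for i, p in enumerate(paras): … break' search for ref_idx
def pvFindRef : List String → Nat → Option Nat
  | [], _ => none
  | p :: rest, i => if pvIsRef p then some i else pvFindRef rest (i + 1)

def split_references (paras : List String) : List String × List String :=
  match pvFindRef paras 0 with
  | none => (paras, [])
  | some i => (PySem.List.slice paras none (some (i : Int)),
               PySem.List.slice paras (some ((i : Int) + 1)) none)

-- ===== PORT B =====
-- one step of Source B's loop over state (found, before, after)
def pvAltStep (st : Bool × List String × List String) (p : String) :
    Bool × List String × List String :=
  if !st.1 && pvIsRef p then (true, st.2.1, st.2.2)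
  else if st.1 then (st.1, st.2.1, st.2.2 ++ [p])
  else (st.1, st.2.1 ++ [p], st.2.2)

def split_references_alt (paras : List String) : List String × List String :=
  let r := paras.foldl pvAltStep (false, [], [])
  (r.2.1, r.2.2)

-- ===== PRECONDITION & SPEC =====
def Spec_split_references (paras : List String) (out : List String × List String) : Prop := out = split_references_alt paras
instance (paras : List String) (out : List String × List String) : Decidable (Spec_split_references paras out) := by unfold Spec_split_references; infer_instance

-- ===== CLAIM (what is proved, stated in full; the proofs are below) =====
def Claim_equal_split_references : Prop := ∀ (paras : List String), Dom_split_references paras → Spec_split_references paras (split_references paras)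

-- ===== LEMMAS AND PROOFS =====

-- once found, every remaining paragraph is appended to 'after'
theorem pvAlt_found (rest : List String) (b a : List String) :
    rest.foldl pvAltStep (true, b, a) = (true, b, a ++ rest) := by
  induction rest generalizing a with
  | nil => simp
  | cons p t ih => simp [pvAltStep, ih]

-- paragraphs already in 'before' stay as a prefix
theorem pvAlt_prefix (rest : List String) (b : List String) :
    rest.foldl pvAltStep (false, b, []) =
      ((rest.foldl pvAltStep (false, [], [])).1,
       b ++ (rest.foldl pvAltStep (false, [], [])).2.1,
       (rest.foldl pvAltStep (false, [], [])).2.2) := by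
  induction rest generalizing b with
  | nil => simp
  | cons p t ih =>
    by_cases h : pvIsRef p
    · simp [pvAltStep, h, pvAlt_found]
    · simp only [List.foldl_cons, pvAltStep, h, Bool.not_false,
        Bool.and_false, Bool.false_eq_true, if_false, List.nil_append]
      rw [ih (b ++ [p]), ih [p]]
      simp

theorem pvAlt_cons (p : String) (rest : List String) :
    split_references_alt (p :: rest) =
      if pvIsRef p then ([], rest)
      else (p :: (split_references_alt rest).1, (split_references_alt rest).2) := by
  by_cases h : pvIsRef p
  · simp [split_references_alt, pvAltStep, h, pvAlt_found]
  · simp only [split_references_alt, List.foldl_cons, pvAltStep, h, Bool.not_false,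
      Bool.true_and, Bool.false_eq_true, if_false, List.nil_append]
    rw [pvAlt_prefix rest [p]]
    simp

-- the index search shifts uniformly with its accumulator
theorem pvFindRef_shift (xs : List String) (i : Nat) :
    pvFindRef xs i = (pvFindRef xs 0).map (· + i) := by
  induction xs generalizing i with
  | nil => simp [pvFindRef]
  | cons p t ih =>
    by_cases h : pvIsRef p
    · simp [pvFindRef, h]
    · simp only [pvFindRef, h]
      rw [ih (i + 1), ih 1]
      cases pvFindRef t 0 <;> simp [Nat.add_comm, Nat.add_left_comm]

theorem pvA_cons (p : String) (rest : List String) :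
    split_references (p :: rest) =
      if pvIsRef p then ([], rest)
      else (p :: (split_references rest).1, (split_references rest).2) := by
  by_cases h : pvIsRef p
  · simp only [split_references, pvFindRef, h, if_true, Nat.cast_zero]
    rw [show ((0 : Int) + 1) = 1 by norm_num, PySem.List.slice_from_one,
      show (0 : Int) = ((0 : Nat) : Int) by norm_num, PySem.List.slice_to_natCast]
    simp
  · simp only [split_references, pvFindRef, h, Bool.false_eq_true, if_false,
      pvFindRef_shift rest 1]
    cases hf : pvFindRef rest 0 with
    | none => simp
    | some i =>
      simp only [Option.map_some]
      rw [show ((i + 1 : Nat) : Int) + 1 = ((i + 2 : Nat) : Int) by push_cast; ring,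
        show ((i : Int) + 1) = ((i + 1 : Nat) : Int) by push_cast; ring,
        PySem.List.slice_from_natCast, PySem.List.slice_from_natCast,
        PySem.List.slice_to_natCast, PySem.List.slice_to_natCast]
      simp [List.take_succ_cons, List.drop_succ_cons]

theorem pv_main (paras : List String) :
    split_references paras = split_references_alt paras := by
  induction paras with
  | nil => rfl
  | cons p rest ih =>
    rw [pvA_cons, pvAlt_cons, ih]

-- ===== VERDICT (by name: the statement is the Claim_ definition above) =====
theorem split_references_spec : Claim_equal_split_references := by
  intro paras _
  exact pv_main paras
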